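-- pv_equiv track=rewrite | github.com/Kinshua/Siren | core/evasion/waf_bypass.py | _octal_encode
-- ===== SOURCE A (Python) =====
-- from typing import (
--     Any,
--     Callable,
--     Deque,
--     Dict,
--     FrozenSet,
--     List,
--     Optional,
--     Set,
--     Tuple,
--     Union,
-- )
--
-- def _octal_encode(payload: str) -> str:
--     """Octal encode each non-alnum character: \\047 style."""
--     result: List[str] = []
--     for ch in payload:
--         if ch.isalnum():
--             result.append(ch)
--         else:
--             result.append(f"\\{ord(ch):03o}")
--     return "".join(result)
-- ===== SOURCE B (Python) =====
-- def _octal_encode(payload: str) -> str: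
--     """Octal encode each non-alnum character: \\047 style."""
--     out = []
--     i, n = 0, len(payload)
--     while i < n:
--         j = i + 1
--         if payload[i].isalnum():
--             while j < n and payload[j].isalnum():
--                 j += 1
--             out.append(payload[i:j])
--         else:
--             while j < n and not payload[j].isalnum():
--                 j += 1
--             out.append("".join("\\%03o" % ord(c) for c in payload[i:j]))
--         i = j
--     return "".join(out)
-- ===== Notes on version B (the rewrite author's own statement) =====
-- stated objective: alternative
-- what changed: Replaces A's per-character loop-and-branch with a two-pointer scan over maximal runs: alnum runs are appended wholesale as slices, non-alnum runs are encoded as a block.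
import Mathlib
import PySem

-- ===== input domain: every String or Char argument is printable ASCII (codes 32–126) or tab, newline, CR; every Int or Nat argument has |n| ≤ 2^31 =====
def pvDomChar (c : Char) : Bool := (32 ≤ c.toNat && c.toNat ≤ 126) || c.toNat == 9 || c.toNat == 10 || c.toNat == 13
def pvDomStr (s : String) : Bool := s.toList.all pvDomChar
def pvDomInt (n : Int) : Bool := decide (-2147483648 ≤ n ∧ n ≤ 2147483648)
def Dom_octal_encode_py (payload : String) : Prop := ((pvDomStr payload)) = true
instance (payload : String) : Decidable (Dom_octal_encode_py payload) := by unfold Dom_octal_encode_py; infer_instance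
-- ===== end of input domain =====

-- B scans the string as maximal runs (alnum runs kept wholesale, non-alnum runs encoded as a
-- block) instead of A's per-character loop-and-branch (objective: alternative; same cost).

-- shared formatting helper: f"\\{n:03o}" / "\\%03o" % n — exact for n < 512, i.e. every char in Dom
def pvOctDigit (n : Nat) : Char := Char.ofNat (48 + n)
def pvOct3 (n : Nat) : List Char :=
  ['\\', pvOctDigit (n / 64 % 8), pvOctDigit (n / 8 % 8), pvOctDigit (n % 8)]

-- ===== PORT A =====
def octal_encode_py (payload : String) : String :=
  let result : List (List Char) :=
    payload.toList.foldl (fun (acc : List (List Char)) ch =>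
      if PySem.Chars.isalnum ch then acc ++ [[ch]] else acc ++ [pvOct3 ch.toNat]) []
  String.ofList (PySem.Chars.join [] result)

-- ===== PORT B =====
-- B's while loop over maximal runs, as recursion on the list: each step consumes one whole
-- run (the leading char plus the takeWhile of same classification, = payload[i:j]).
def pvRunsB (l : List Char) : List (List Char) :=
  match l with
  | [] => []
  | c :: rest =>
    if PySem.Chars.isalnum c then
      (c :: rest.takeWhile (fun ch => PySem.Chars.isalnum ch)) ::
        pvRunsB (rest.dropWhile (fun ch => PySem.Chars.isalnum ch))
    else
      (((c :: rest.takeWhile (fun ch => !PySem.Chars.isalnum ch)).map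
          (fun ch => pvOct3 ch.toNat)).flatten) ::
        pvRunsB (rest.dropWhile (fun ch => !PySem.Chars.isalnum ch))
termination_by l.length
decreasing_by
  all_goals simp only [List.length_cons]
  all_goals exact Nat.lt_succ_of_le (List.length_dropWhile_le _ _)

def octal_encode_py_alt (payload : String) : String :=
  String.ofList (pvRunsB payload.toList).flatten

-- ===== PRECONDITION & SPEC =====
def Spec_octal_encode_py (payload : String) (out : String) : Prop := out = octal_encode_py_alt payload
instance (payload : String) (out : String) : Decidable (Spec_octal_encode_py payload out) := by unfold Spec_octal_encode_py; infer_instance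

-- ===== CLAIM (what is proved, stated in full; the proofs are below) =====
def Claim_equal_octal_encode_py : Prop := ∀ (payload : String), Dom_octal_encode_py payload → Spec_octal_encode_py payload (octal_encode_py payload)

-- ===== LEMMAS AND PROOFS =====

-- the per-character translation A realises
def pvTrans (ch : Char) : List Char :=
  if PySem.Chars.isalnum ch then [ch] else pvOct3 ch.toNat

theorem pv_join_nil_flatten (parts : List (List Char)) :
    PySem.Chars.join [] parts = parts.flatten := by
  induction parts with
  | nil => rfl
  | cons x xs ih =>
    cases xs with
    | nil => simp [PySem.Chars.join, List.intercalate, List.intersperse]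
    | cons y ys =>
      rw [PySem.Chars.join_cons_cons, ih]
      simp

theorem pvA_map (l : List Char) :
    (l.foldl (fun (acc : List (List Char)) ch =>
      if PySem.Chars.isalnum ch then acc ++ [[ch]] else acc ++ [pvOct3 ch.toNat]) [])
    = l.map pvTrans := by
  have hf : (fun (acc : List (List Char)) ch =>
      if PySem.Chars.isalnum ch then acc ++ [[ch]] else acc ++ [pvOct3 ch.toNat])
      = (fun acc ch => acc ++ [pvTrans ch]) := by
    funext acc ch
    unfold pvTrans
    split <;> rfl
  rw [hf, PySem.List.foldl_append_singleton_eq_map]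
  simp

-- splitting a list at a takeWhile/dropWhile boundary splits the flattened translation
theorem pv_flat_split (c : Char) (rest : List Char) (p : Char → Bool) :
    ((c :: rest).map pvTrans).flatten
      = pvTrans c ++ ((rest.takeWhile p).map pvTrans).flatten
          ++ ((rest.dropWhile p).map pvTrans).flatten := by
  simp only [List.map_cons, List.flatten_cons, List.append_assoc]
  congr 1
  conv_lhs => rw [← List.takeWhile_append_dropWhile (p := p) (l := rest)]
  rw [List.map_append, List.flatten_append]

theorem pv_flat_singleton (l : List Char) (h : ∀ x ∈ l, PySem.Chars.isalnum x = true) :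
    (l.map pvTrans).flatten = l := by
  induction l with
  | nil => rfl
  | cons a t ih =>
    simp only [List.map_cons, List.flatten_cons]
    rw [ih (fun x hx => h x (List.mem_cons_of_mem _ hx))]
    simp [pvTrans, h a (List.mem_cons_self ..)]

-- B's run decomposition flattens to the per-character translation
theorem pvRunsB_flatten (l : List Char) :
    (pvRunsB l).flatten = (l.map pvTrans).flatten := by
  induction l using pvRunsB.induct with
  | case1 => simp [pvRunsB]
  | case2 c rest h ih =>
    rw [pvRunsB]
    simp only [if_pos h, List.flatten_cons, ih,
      pv_flat_split c rest (fun ch => PySem.Chars.isalnum ch)]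
    have hs : ((rest.takeWhile (fun ch => PySem.Chars.isalnum ch)).map pvTrans).flatten
        = rest.takeWhile (fun ch => PySem.Chars.isalnum ch) := by
      apply pv_flat_singleton
      intro x hx
      simpa using List.mem_takeWhile_imp hx
    rw [hs]
    simp [pvTrans, h]
  | case3 c rest h ih =>
    rw [pvRunsB]
    simp only [if_neg h, List.flatten_cons, ih,
      pv_flat_split c rest (fun ch => !PySem.Chars.isalnum ch)]
    have htk : (rest.takeWhile (fun ch => !PySem.Chars.isalnum ch)).map pvTrans
        = (rest.takeWhile (fun ch => !PySem.Chars.isalnum ch)).map (fun ch => pvOct3 ch.toNat) := by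
      apply List.map_congr_left
      intro x hx
      have := List.mem_takeWhile_imp hx
      simp only [Bool.not_eq_true'] at this
      simp [pvTrans, this]
    simp only [List.map_cons, List.flatten_cons, ← htk]
    simp [pvTrans, h, List.append_assoc]

-- ===== VERDICT (by name: the statement is the Claim_ definition above) =====
theorem octal_encode_py_spec : Claim_equal_octal_encode_py := by
  intro payload _
  unfold Spec_octal_encode_py octal_encode_py octal_encode_py_alt
  simp only [pvA_map, pv_join_nil_flatten, pvRunsB_flatten]
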